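-- pv_equiv track=rewrite | github.com/mblsha/retrobus-explorer | gateware/reference/spade-projects/sharp-pc-e500-card-spade/experiments/experiment_catalog.py | build_asm_jr_chain_skip_nop
-- ===== SOURCE A (Python) =====
-- def build_asm_jr_chain_skip_nop(count: int) -> str:
--     lines = [".ORG 0x10100", "", "start:"]
--     for _ in range(count):
--         lines.append("    JR +1")
--         lines.append("    NOP")
--     lines.append("    RETF")
--     lines.append("")
--     return "\n".join(lines)
-- ===== SOURCE B (Python) =====
-- def build_asm_jr_chain_skip_nop(count: int) -> str:
--     return ".ORG 0x10100\n\nstart:\n" + "    JR +1\n    NOP\n" * count + "    RETF\n"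
-- ===== Notes on version B (the rewrite author's own statement) =====
-- stated objective: simpler
-- what changed: Replaces the line-list building loop and '\n'.join with a single closed-form concatenation header + body*count + footer using string repetition.
import Mathlib
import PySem

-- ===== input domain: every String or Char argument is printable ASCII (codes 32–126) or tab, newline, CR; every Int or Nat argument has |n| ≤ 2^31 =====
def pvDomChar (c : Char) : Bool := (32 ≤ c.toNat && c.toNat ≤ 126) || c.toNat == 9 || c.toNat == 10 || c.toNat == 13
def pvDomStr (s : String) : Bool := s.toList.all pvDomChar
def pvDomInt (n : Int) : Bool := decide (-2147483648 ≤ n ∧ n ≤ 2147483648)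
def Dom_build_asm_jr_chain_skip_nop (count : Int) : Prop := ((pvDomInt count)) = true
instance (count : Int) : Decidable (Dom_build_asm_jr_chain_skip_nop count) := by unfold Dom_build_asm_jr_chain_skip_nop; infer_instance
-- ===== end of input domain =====

-- B builds the output as one closed-form concatenation (header ++ repeated body ++ footer) instead of A's append-lines loop + join; objective: simpler.


-- ===== PORT A =====
def build_asm_jr_chain_skip_nop (count : Int) : String :=
  let lines : List String := [".ORG 0x10100", "", "start:"]
  let lines := (PySem.List.pyRange 0 count 1).foldl
    (fun ls _ => (ls ++ ["    JR +1"]) ++ ["    NOP"]) lines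
  let lines := lines ++ ["    RETF"]
  let lines := lines ++ [""]
  PySem.Str.join "\n" lines

-- ===== PORT B =====
-- Python's `s * n` on strings (empty for n ≤ 0)
def pyStrMul (s : String) (n : Int) : String :=
  String.join (List.replicate n.toNat s)

def build_asm_jr_chain_skip_nop_alt (count : Int) : String :=
  ".ORG 0x10100\n\nstart:\n" ++ pyStrMul "    JR +1\n    NOP\n" count ++ "    RETF\n"

-- ===== PRECONDITION & SPEC =====
def Spec_build_asm_jr_chain_skip_nop (count : Int) (out : String) : Prop := out = build_asm_jr_chain_skip_nop_alt count
instance (count : Int) (out : String) : Decidable (Spec_build_asm_jr_chain_skip_nop count out) := by unfold Spec_build_asm_jr_chain_skip_nop; infer_instance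

-- ===== CLAIM (what is proved, stated in full; the proofs are below) =====
def Claim_equal_build_asm_jr_chain_skip_nop : Prop := ∀ (count : Int), Dom_build_asm_jr_chain_skip_nop count → Spec_build_asm_jr_chain_skip_nop count (build_asm_jr_chain_skip_nop count)

-- ===== LEMMAS AND PROOFS =====

-- A's loop body ignores the loop variable: the foldl just appends count copies of the two lines.
theorem pvLoopAppend (l : List Int) (init : List String) :
    l.foldl (fun ls _ => (ls ++ ["    JR +1"]) ++ ["    NOP"]) init
      = init ++ (List.replicate l.length ["    JR +1", "    NOP"]).flatten := by
  induction l generalizing init with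
  | nil => simp
  | cons x xs ih => simp [List.foldl, List.replicate_succ]

-- '\n'-joining h, n JR/NOP pairs, RETF and a trailing empty piece, at the char level.
theorem pvJoinKey (n : Nat) (h : List Char) :
    PySem.Chars.join ['\n']
        (h :: ((List.replicate n ["    JR +1".toList, "    NOP".toList]).flatten ++ ["    RETF".toList, ([] : List Char)]))
      = h ++ ['\n'] ++ (List.replicate n "    JR +1\n    NOP\n".toList).flatten ++ "    RETF\n".toList := by
  induction n generalizing h with
  | zero =>
    simp [PySem.Chars.join_cons_cons, PySem.Chars.join_singleton]
      -- (n = 0: no pairs)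
  | succ n ih =>
    simp only [List.replicate_succ, List.flatten_cons, List.cons_append, List.append_assoc,
      List.nil_append]
    simp only [PySem.Chars.join_cons_cons]
    rw [ih]
    simp [List.replicate_succ]

-- String.join is flatten at the char level.
theorem pvToListFoldlAppend (xs : List String) (acc : String) :
    (List.foldl (fun r s => r ++ s) acc xs).toList = acc.toList ++ (xs.map String.toList).flatten := by
  induction xs generalizing acc with
  | nil => simp
  | cons x xs ih => simp [List.foldl, ih]

theorem pvToListJoinEmpty (l : List String) :
    (String.join l).toList = (l.map String.toList).flatten := by
  simp [String.join, pvToListFoldlAppend]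

-- ===== VERDICT (by name: the statement is the Claim_ definition above) =====
theorem build_asm_jr_chain_skip_nop_spec : Claim_equal_build_asm_jr_chain_skip_nop := by
  intro count _
  unfold Spec_build_asm_jr_chain_skip_nop
  apply String.ext
  rw [build_asm_jr_chain_skip_nop, build_asm_jr_chain_skip_nop_alt]
  simp only [pvLoopAppend]
  rw [PySem.Str.toList_join]
  have hlen : (PySem.List.pyRange 0 count 1).length = count.toNat := by
    simp [PySem.List.length_pyRange_one]
  rw [hlen]
  simp only [List.map_append, List.map_flatten, List.map_replicate, List.map_cons, List.map_nil]
  have hnl : "\n".toList = ['\n'] := rfl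
  rw [hnl]
  simp only [List.map_cons,
    List.cons_append, List.append_assoc, List.nil_append]
  simp only [PySem.Chars.join_cons_cons]
  have h0 : "".toList = ([] : List Char) := rfl
  rw [h0, pvJoinKey]
  rw [pyStrMul, String.toList_append, String.toList_append, pvToListJoinEmpty]
  simp [List.map_replicate]
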